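-- pv_equiv track=rewrite | github.com/networkx/networkx | networkx/generators/trees.py | _num_rooted_forests
-- ===== SOURCE A (Python) =====
-- def _num_rooted_forests(n, q, cache_forests):
--     """Returns the number of unlabeled rooted forests with `n` nodes, and with
--     no more than `q` nodes per tree. A recursive formula for this is (2) in
--     [1]_. This function is implemented using dynamic programming instead of
--     recursion.
--
--     Parameters
--     ----------
--     n : int
--         The number of nodes.
--     q : int
--         The maximum number of nodes for each tree of the forest.
--     cache_forests : list of ints
--         The $i$-th element is the number of unlabeled rooted forests with
--         $i$ nodes, and with no more than `q` nodes per tree; this is used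
--         as a cache (and is extended to length `n` + 1 if needed).
--
--     Returns
--     -------
--     int
--         The number of unlabeled rooted forests with `n` nodes with no more than
--         `q` nodes per tree.
--
--     References
--     ----------
--     .. [1] Wilf, Herbert S. "The uniform selection of free trees."
--         Journal of Algorithms 2.2 (1981): 204-207.
--         https://doi.org/10.1016/0196-6774(81)90021-3
--     """
--     for n_i in range(len(cache_forests), n + 1):
--         q_i = min(n_i, q)
--         cache_forests.append(
--             sum(
--                 [
--                     d * cache_forests[n_i - j * d] * cache_forests[d - 1]
--                     for d in range(1, q_i + 1)
--                     for j in range(1, n_i // d + 1)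
--                 ]
--             )
--             // n_i
--         )
--
--     return cache_forests[n]
-- ===== SOURCE B (Python) =====
-- def _num_rooted_forests(n, q, cache_forests):
--     f = cache_forests
--     L = len(f)
--     if L <= n:
--         qmax = min(n, q)
--         # S[d-1][m] = sum of f[m - j*d] for j = 1 .. m // d  (stride-d partial sums)
--         S = []
--         for d in range(1, qmax + 1):
--             col = [0] * min(d, L)
--             for m in range(d, L):
--                 col.append(col[m - d] + f[m - d])
--             S.append(col)
--         for n_i in range(L, n + 1):
--             total = 0
--             for i, col in enumerate(S):
--                 d = i + 1
--                 if d <= n_i: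
--                     s = col[n_i - d] + f[n_i - d]
--                     total += d * f[d - 1] * s
--                 else:
--                     s = 0
--                 col.append(s)
--             f.append(total // n_i)
--     return f[n]
-- ===== Notes on version B (the rewrite author's own statement) =====
-- stated objective: alternative
-- what changed: Replaces A's per-step rescan over all multiples j*d (a double comprehension per new cache entry) by incrementally maintained stride-d partial-sum columns S[d-1][m] = sum_j f[m-j*d], so each new entry is computed from one reading per tree size d.
import Mathlib
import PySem

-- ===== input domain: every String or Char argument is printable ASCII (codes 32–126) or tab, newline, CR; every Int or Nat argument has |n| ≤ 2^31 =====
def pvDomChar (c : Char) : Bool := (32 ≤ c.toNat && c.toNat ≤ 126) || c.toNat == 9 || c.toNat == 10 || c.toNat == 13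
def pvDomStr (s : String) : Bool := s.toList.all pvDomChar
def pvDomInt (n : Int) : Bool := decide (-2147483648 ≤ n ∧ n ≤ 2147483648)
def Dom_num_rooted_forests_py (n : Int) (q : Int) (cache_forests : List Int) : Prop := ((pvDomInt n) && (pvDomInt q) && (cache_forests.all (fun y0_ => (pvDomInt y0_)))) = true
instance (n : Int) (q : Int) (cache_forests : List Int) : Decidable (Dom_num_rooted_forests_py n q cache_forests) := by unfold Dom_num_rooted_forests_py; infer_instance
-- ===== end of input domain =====

-- B replaces A's per-step rescan of all multiples j*d by incrementally maintained stride-d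
-- partial-sum columns (one per tree size d): a different algorithm over different state.
-- Both A and B extend the caller's cache list in place (same side effect); the theorems below
-- are about the return value.

-- ===== PORT A =====
-- body of A's 'for n_i' loop: append (sum of the double comprehension) // n_i
def pvBodyA (q : Int) (f : List Int) (n_i : Int) : List Int :=
  let q_i := min n_i q
  f ++ [PySem.Int.floordiv
    (((PySem.List.pyRange 1 (q_i + 1) 1).flatMap (fun d =>
      (PySem.List.pyRange 1 (PySem.Int.floordiv n_i d + 1) 1).map (fun j =>
        d * PySem.List.pyGetD f (n_i - j * d) 0 * PySem.List.pyGetD f (d - 1) 0))).sum)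
    n_i]

-- all list indexing in both ports uses pyGetD with default 0; inside Pre_ every index is in range
def num_rooted_forests_py (n : Int) (q : Int) (cache_forests : List Int) : Int :=
  let f := (PySem.List.pyRange (PySem.List.len cache_forests) (n + 1) 1).foldl (pvBodyA q) cache_forests
  PySem.List.pyGetD f n 0

-- ===== PORT B =====
-- B inner-loop body, 's' of Source B: the new entry of column d = i+1 (0 when d > n_i)
def pvSel (n_i : Int) (f : List Int) (ic : Int × List Int) : Int :=
  if ic.1 + 1 ≤ n_i then
    PySem.List.pyGetD ic.2 (n_i - (ic.1 + 1)) 0 + PySem.List.pyGetD f (n_i - (ic.1 + 1)) 0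
  else 0

-- B inner-loop body: the amount added to 'total' for column d = i+1 (the guarded 'total +=')
def pvTerm (n_i : Int) (f : List Int) (ic : Int × List Int) : Int :=
  if ic.1 + 1 ≤ n_i then (ic.1 + 1) * PySem.List.pyGetD f (ic.1 + 1 - 1) 0 * pvSel n_i f ic else 0

-- bootstrap of Source B: stride-d partial-sum column for the cache handed in
def pvColB (f : List Int) (d : Int) : List Int :=
  (PySem.List.pyRange d (PySem.List.len f) 1).foldl
    (fun col m => col ++ [PySem.List.pyGetD col (m - d) 0 + PySem.List.pyGetD f (m - d) 0])
    (List.replicate (min d (PySem.List.len f)).toNat 0)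

-- one iteration of Source B's main loop: extend every column, then append total // n_i to f
def pvStepB (n_i : Int) (S : List (List Int)) (f : List Int) : List (List Int) × List Int :=
  let r := (PySem.List.enumerate S 0).foldl
    (fun (acc : Int × List (List Int)) ic =>
      (acc.1 + pvTerm n_i f ic, acc.2 ++ [ic.2 ++ [pvSel n_i f ic]]))
    ((0 : Int), ([] : List (List Int)))
  (r.2, f ++ [PySem.Int.floordiv r.1 n_i])

def num_rooted_forests_py_alt (n : Int) (q : Int) (cache_forests : List Int) : Int :=
  let L := PySem.List.len cache_forests
  let f := if L ≤ n then
      let qmax := min n q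
      let S0 := (PySem.List.pyRange 1 (qmax + 1) 1).map (pvColB cache_forests)
      ((PySem.List.pyRange L (n + 1) 1).foldl (fun p n_i => pvStepB n_i p.1 p.2) (S0, cache_forests)).2
    else cache_forests
  PySem.List.pyGetD f n 0

-- ===== PRECONDITION & SPEC =====
-- Exactly the inputs where Python A returns: an empty cache with 0 ≤ n reaches 0 // 0
-- (ZeroDivisionError), and n < -len(cache_forests) makes the final cache_forests[n] raise
-- IndexError; everywhere else every index the loop touches is in range and A returns.
def Pre_num_rooted_forests_py (n : Int) (q : Int) (cache_forests : List Int) : Prop :=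
  cache_forests ≠ [] ∧ -(cache_forests.length : Int) ≤ n
instance (n : Int) (q : Int) (cache_forests : List Int) : Decidable (Pre_num_rooted_forests_py n q cache_forests) := by unfold Pre_num_rooted_forests_py; infer_instance

def pvWitness_num_rooted_forests_py : Int × Int × List Int := (3, 2, [1])

def Spec_num_rooted_forests_py (n : Int) (q : Int) (cache_forests : List Int) (out : Int) : Prop := out = num_rooted_forests_py_alt n q cache_forests
instance (n : Int) (q : Int) (cache_forests : List Int) (out : Int) : Decidable (Spec_num_rooted_forests_py n q cache_forests out) := by unfold Spec_num_rooted_forests_py; infer_instance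

-- ===== CLAIM (what is proved, stated in full; the proofs are below) =====
def Claim_equal_num_rooted_forests_py : Prop := ∀ (n : Int) (q : Int) (cache_forests : List Int), Dom_num_rooted_forests_py n q cache_forests → Pre_num_rooted_forests_py n q cache_forests → Spec_num_rooted_forests_py n q cache_forests (num_rooted_forests_py n q cache_forests)

-- ===== LEMMAS AND PROOFS =====

-- S_d(m): the stride-d partial sum  sum_{j=1..m//d} f[m - j*d]  both programs rely on
def pvSsum (f : List Int) (d m : Int) : Int :=
  ((PySem.List.pyRange 1 (PySem.Int.floordiv m d + 1) 1).map
    (fun j => PySem.List.pyGetD f (m - j * d) 0)).sum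

-- the invariant tying B's columns to pvSsum over the current cache
def pvInv (f : List Int) (S : List (List Int)) : Prop :=
  ∀ (i : Nat) (hi : i < S.length),
    S[i].length = f.length ∧
    ∀ (m : Nat) (hm : m < S[i].length), S[i][m] = pvSsum f ((i : Int) + 1) (m : Int)

lemma pvSum_flatMap (l : List Int) (g : Int → List Int) :
    (l.flatMap g).sum = (l.map (fun d => (g d).sum)).sum := by
  induction l with
  | nil => simp
  | cons h t ih => simp [ih]

lemma pvSsum_zero (f : List Int) (d m : Int) (hd : 1 ≤ d) (h0 : 0 ≤ m) (hm : m < d) :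
    pvSsum f d m = 0 := by
  unfold pvSsum
  rw [PySem.Int.floordiv_eq_ediv_of_pos (by omega), Int.ediv_eq_zero_of_lt h0 hm,
    PySem.List.pyRange_one_eq_nil (by omega)]
  simp

lemma pvSsum_rec (f : List Int) (d m : Int) (hd : 1 ≤ d) (hm : d ≤ m) :
    pvSsum f d m = pvSsum f d (m - d) + PySem.List.pyGetD f (m - d) 0 := by
  unfold pvSsum
  have hdpos : (0:Int) < d := by omega
  have ht : PySem.Int.floordiv m d = PySem.Int.floordiv (m - d) d + 1 := by
    rw [PySem.Int.floordiv_eq_ediv_of_pos hdpos, PySem.Int.floordiv_eq_ediv_of_pos hdpos]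
    have h : m = (m - d) + 1 * d := by ring
    rw [h, Int.add_mul_ediv_right _ _ (by omega : d ≠ 0)]
    ring_nf
  have ht0 : 0 ≤ PySem.Int.floordiv (m - d) d := by
    rw [PySem.Int.floordiv_eq_ediv_of_pos hdpos]
    exact Int.ediv_nonneg (by omega) (by omega)
  rw [ht, PySem.List.pyRange_one, PySem.List.pyRange_one]
  have h1 : (PySem.Int.floordiv (m-d) d + 1 + 1 - 1).toNat = (PySem.Int.floordiv (m-d) d).toNat + 1 := by omega
  have h2 : (PySem.Int.floordiv (m-d) d + 1 - 1).toNat = (PySem.Int.floordiv (m-d) d).toNat := by omega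
  rw [h1, h2, List.range_succ_eq_map]
  simp only [List.map_cons, List.map_map, List.sum_cons]
  rw [add_comm]
  congr 1
  · congr 1
    apply List.map_congr_left
    intro k _
    simp only [Function.comp_apply]
    congr 1
    push_cast
    ring
  · norm_num

lemma pvGetD_append_left (f g : List Int) (i : Int) (h0 : 0 ≤ i) (h1 : i < (f.length : Int)) :
    PySem.List.pyGetD (f ++ g) i 0 = PySem.List.pyGetD f i 0 := by
  rw [PySem.List.pyGetD_eq_getElem _ _ h0 (by simp; omega),
    PySem.List.pyGetD_eq_getElem _ _ h0 h1, List.getElem_append_left]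

lemma pvSsum_stable (f g : List Int) (d m : Int) (hd : 1 ≤ d) (h0 : 0 ≤ m)
    (hm : m ≤ (f.length : Int)) : pvSsum (f ++ g) d m = pvSsum f d m := by
  unfold pvSsum
  refine congrArg List.sum (List.map_congr_left ?_)
  intro j hj
  rw [PySem.List.mem_pyRange_one] at hj
  have hjd : j * d ≤ m :=
    (PySem.Int.le_floordiv_iff_mul_le (by omega)).mp (by omega)
  have hdjd : d ≤ j * d := by nlinarith [hj.1]
  exact pvGetD_append_left f g _ (by omega) (by omega)

lemma pvStepB_eq (n_i : Int) (S : List (List Int)) (f : List Int) :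
    pvStepB n_i S f =
      ((PySem.List.enumerate S 0).map (fun ic => ic.2 ++ [pvSel n_i f ic]),
       f ++ [PySem.Int.floordiv ((PySem.List.enumerate S 0).map (pvTerm n_i f)).sum n_i]) := by
  unfold pvStepB
  rw [PySem.List.foldl_prod_mk (f := fun a ic => a + pvTerm n_i f ic)
    (g := fun a ic => a ++ [ic.2 ++ [pvSel n_i f ic]]),
    PySem.List.foldl_add, PySem.List.foldl_append_singleton_eq_map]
  simp

-- generic truncation: a guarded sum over a longer range equals the plain sum over the prefix
lemma pvSum_trunc (T : Nat → Int) (P : Nat → Prop) [DecidablePred P] (t1 t2 : Nat)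
    (h12 : t1 ≤ t2) (hin : ∀ k, k < t1 → P k) (hout : ∀ k, t1 ≤ k → k < t2 → ¬ P k) :
    ((List.range t2).map (fun k => if P k then T k else 0)).sum = ((List.range t1).map T).sum := by
  obtain ⟨m, rfl⟩ : ∃ m, t2 = t1 + m := ⟨t2 - t1, by omega⟩
  rw [List.range_add, List.map_append, List.sum_append]
  have h1 : (List.range t1).map (fun k => if P k then T k else 0) = (List.range t1).map T :=
    List.map_congr_left (fun k hk => by rw [List.mem_range] at hk; simp [hin k hk])
  have h2 : ((List.range m).map (fun x => t1 + x)).map (fun k => if P k then T k else 0)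
      = (List.range m).map (fun _ => (0 : Int)) := by
    rw [List.map_map]
    exact List.map_congr_left (fun x hx => by
      rw [List.mem_range] at hx; simp [hout (t1 + x) (by omega) (by omega)])
  rw [h1, h2]
  simp

-- the per-d contribution both programs sum
def pvT (f : List Int) (a : Int) (k : Nat) : Int :=
  (1 + (k : Int)) * PySem.List.pyGetD f (1 + (k : Int) - 1) 0 * pvSsum f (1 + (k : Int)) a

lemma pvAsum_eq (f : List Int) (a q_i : Int) :
    ((PySem.List.pyRange 1 (q_i + 1) 1).flatMap (fun d =>
      (PySem.List.pyRange 1 (PySem.Int.floordiv a d + 1) 1).map (fun j =>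
        d * PySem.List.pyGetD f (a - j * d) 0 * PySem.List.pyGetD f (d - 1) 0))).sum
    = ((List.range q_i.toNat).map (pvT f a)).sum := by
  rw [pvSum_flatMap, PySem.List.pyRange_one, List.map_map]
  have h : (q_i + 1 - 1).toNat = q_i.toNat := by omega
  rw [h]
  refine congrArg List.sum (List.map_congr_left ?_)
  intro k _
  simp only [Function.comp_apply]
  have e1 : (PySem.List.pyRange 1 (PySem.Int.floordiv a (1 + (k:Int)) + 1) 1).map
      (fun j => (1 + (k:Int)) * PySem.List.pyGetD f (a - j * (1 + (k:Int))) 0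
        * PySem.List.pyGetD f ((1 + (k:Int)) - 1) 0)
    = (PySem.List.pyRange 1 (PySem.Int.floordiv a (1 + (k:Int)) + 1) 1).map
      (fun j => ((1 + (k:Int)) * PySem.List.pyGetD f ((1 + (k:Int)) - 1) 0)
        * PySem.List.pyGetD f (a - j * (1 + (k:Int))) 0) := by
    apply List.map_congr_left; intro j _; ring
  rw [e1, List.sum_map_mul_left]
  unfold pvT pvSsum
  ring

-- the value B writes at the end of column k is S_{k+1}(len f)
lemma pvSel_val (f : List Int) (S : List (List Int)) (hInv : pvInv f S)
    (k : Nat) (hk : k < S.length) :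
    pvSel (f.length : Int) f ((k : Int), S[k]) = pvSsum f ((k : Int) + 1) (f.length : Int) := by
  obtain ⟨hlen, hval⟩ := hInv k hk
  unfold pvSel
  simp only
  by_cases h : (k : Int) + 1 ≤ (f.length : Int)
  · rw [if_pos h]
    have h0 : (0:Int) ≤ (f.length : Int) - ((k:Int)+1) := by omega
    have h1 : (f.length : Int) - ((k:Int)+1) < (S[k].length : Int) := by rw [hlen]; omega
    rw [PySem.List.pyGetD_eq_getElem _ _ h0 h1]
    have hm : ((f.length : Int) - ((k:Int)+1)).toNat < S[k].length := by omega
    rw [hval _ hm]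
    have hc : ((((f.length : Int) - ((k:Int)+1)).toNat : Int)) = (f.length : Int) - ((k:Int)+1) := by omega
    rw [hc, pvSsum_rec f ((k:Int)+1) (f.length : Int) (by omega) (by omega)]
  · rw [if_neg h, pvSsum_zero f _ _ (by omega) (by omega) (by omega)]

lemma pvBsum_eq (f : List Int) (S : List (List Int)) (hInv : pvInv f S) :
    ((PySem.List.enumerate S 0).map (pvTerm (f.length : Int) f)).sum
    = ((List.range S.length).map (fun (k : Nat) =>
        if (k : Int) + 1 ≤ (f.length : Int) then pvT f (f.length : Int) k else 0)).sum := by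
  congr 1
  apply List.ext_getElem
  · simp [PySem.List.length_enumerate]
  · intro k h1 h2
    simp only [List.getElem_map, PySem.List.getElem_enumerate, List.getElem_range, zero_add]
    have hk : k < S.length := by simpa [PySem.List.length_enumerate] using h1
    unfold pvTerm
    simp only
    by_cases h : (k : Int) + 1 ≤ (f.length : Int)
    · rw [if_pos h, if_pos h, pvSel_val f S hInv k hk]
      unfold pvT
      ring_nf
    · rw [if_neg h, if_neg h]

lemma pvStep_sum (n q : Int) (f : List Int) (S : List (List Int))
    (hInv : pvInv f S) (hS : S.length = (min n q).toNat) (ha : (f.length : Int) ≤ n) :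
    ((PySem.List.enumerate S 0).map (pvTerm (f.length : Int) f)).sum
    = ((PySem.List.pyRange 1 (min (f.length : Int) q + 1) 1).flatMap (fun d =>
        (PySem.List.pyRange 1 (PySem.Int.floordiv (f.length : Int) d + 1) 1).map (fun j =>
          d * PySem.List.pyGetD f ((f.length : Int) - j * d) 0
            * PySem.List.pyGetD f (d - 1) 0))).sum := by
  rw [pvBsum_eq f S hInv, pvAsum_eq, hS]
  exact pvSum_trunc (pvT f (f.length : Int)) (fun k => (k : Int) + 1 ≤ (f.length : Int))
    (min (f.length : Int) q).toNat ((min n q).toNat)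
    (by omega) (fun k hk => by omega) (fun k hk1 hk2 => by omega)

lemma pvInv_step (f : List Int) (S : List (List Int)) (x : Int) (hInv : pvInv f S) :
    pvInv (f ++ [x])
      ((PySem.List.enumerate S 0).map (fun ic => ic.2 ++ [pvSel (f.length : Int) f ic])) := by
  intro i hi
  have hiS : i < S.length := by simpa [PySem.List.length_enumerate] using hi
  obtain ⟨hlen, hval⟩ := hInv i hiS
  simp only [List.getElem_map, PySem.List.getElem_enumerate, zero_add]
  constructor
  · simp [hlen]
  · intro m hm
    simp only [List.length_append, List.length_cons, List.length_nil, hlen] at hm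
    by_cases hmf : m < f.length
    · rw [List.getElem_append_left (by omega : m < S[i].length), hval m (by omega),
        pvSsum_stable f [x] _ _ (by omega) (by omega) (by omega)]
    · rw [List.getElem_concat_length (by omega : m = S[i].length),
        pvSel_val f S hInv i hiS,
        pvSsum_stable f [x] _ _ (by omega) (by omega) (by omega)]
      congr 1
      omega

lemma pvAppend_inv (col : List Int) (v : Int) (f : List Int) (d : Int)
    (hcol : ∀ (m : Nat) (hm : m < col.length), col[m] = pvSsum f d (m : Int))
    (hv : v = pvSsum f d (col.length : Int)) :
    ∀ (m : Nat) (hm : m < (col ++ [v]).length), (col ++ [v])[m] = pvSsum f d (m : Int) := by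
  intro m hm
  simp only [List.length_append, List.length_cons, List.length_nil] at hm
  by_cases hmc : m < col.length
  · rw [List.getElem_append_left hmc]; exact hcol m hmc
  · rw [List.getElem_concat_length (by omega : m = col.length), hv]
    congr 1
    omega

lemma pvColB_loop (f : List Int) (d : Int) (hd : 1 ≤ d) (k : Nat) :
    ∀ (col : List Int), d ≤ (col.length : Int) →
    (∀ (m : Nat) (hm : m < col.length), col[m] = pvSsum f d (m : Int)) →
    (((PySem.List.pyRange (col.length : Int) ((col.length : Int) + k) 1).foldl
        (fun col m => col ++ [PySem.List.pyGetD col (m - d) 0 + PySem.List.pyGetD f (m - d) 0])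
        col).length = col.length + k
    ∧ ∀ (m : Nat) (hm : m < ((PySem.List.pyRange (col.length : Int) ((col.length : Int) + k) 1).foldl
        (fun col m => col ++ [PySem.List.pyGetD col (m - d) 0 + PySem.List.pyGetD f (m - d) 0])
        col).length),
        ((PySem.List.pyRange (col.length : Int) ((col.length : Int) + k) 1).foldl
        (fun col m => col ++ [PySem.List.pyGetD col (m - d) 0 + PySem.List.pyGetD f (m - d) 0])
        col)[m] = pvSsum f d (m : Int)) := by
  induction k with
  | zero =>
    intro col hdc hcol
    rw [PySem.List.pyRange_one_eq_nil (by omega)]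
    exact ⟨by simp, fun m hm => hcol m (by simpa using hm)⟩
  | succ k ih =>
    intro col hdc hcol
    rw [PySem.List.pyRange_one_cons (by omega), List.foldl_cons]
    have hval : PySem.List.pyGetD col ((col.length : Int) - d) 0
        + PySem.List.pyGetD f ((col.length : Int) - d) 0 = pvSsum f d (col.length : Int) := by
      rw [pvSsum_rec f d (col.length : Int) hd hdc]
      congr 1
      rw [PySem.List.pyGetD_eq_getElem _ _ (by omega) (by omega), hcol _ (by omega)]
      congr 1
      omega
    have hcv' := pvAppend_inv col _ f d hcol hval
    have e : PySem.List.pyRange ((col.length : Int) + 1) ((col.length : Int) + ((k:Nat)+1:Nat)) 1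
        = PySem.List.pyRange (((col ++ [PySem.List.pyGetD col ((col.length : Int) - d) 0
            + PySem.List.pyGetD f ((col.length : Int) - d) 0]).length : Int))
          (((col ++ [PySem.List.pyGetD col ((col.length : Int) - d) 0
            + PySem.List.pyGetD f ((col.length : Int) - d) 0]).length : Int) + (k:Nat)) 1 := by
      have c1 : (((col ++ [PySem.List.pyGetD col ((col.length : Int) - d) 0
          + PySem.List.pyGetD f ((col.length : Int) - d) 0]).length : Int)) = (col.length : Int) + 1 := by
        simp
      rw [c1]
      have c2 : ((col.length : Int) + (((k:Nat)+1:Nat) : Int)) = (col.length : Int) + 1 + (k:Int) := by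
        push_cast; ring
      rw [c2]
    rw [e]
    obtain ⟨l1, l2⟩ := ih (col ++ [PySem.List.pyGetD col ((col.length : Int) - d) 0
      + PySem.List.pyGetD f ((col.length : Int) - d) 0]) (by simp; omega) hcv'
    refine ⟨?_, l2⟩
    rw [l1]
    simp
    omega

lemma pvColB_spec (f : List Int) (d : Int) (hd : 1 ≤ d) :
    (pvColB f d).length = f.length ∧
    ∀ (m : Nat) (hm : m < (pvColB f d).length), (pvColB f d)[m] = pvSsum f d (m : Int) := by
  unfold pvColB
  rw [PySem.List.len_eq]
  by_cases hLd : (f.length : Int) ≤ d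
  · rw [PySem.List.pyRange_one_eq_nil (by omega)]
    have hmin : (min d (f.length : Int)).toNat = f.length := by omega
    simp only [List.foldl_nil, hmin]
    refine ⟨by simp, fun m hm => ?_⟩
    simp only [List.getElem_replicate]
    rw [pvSsum_zero f d m (by omega) (by omega) (by simp at hm; omega)]
  · have hmin : (min d (f.length : Int)).toNat = d.toNat := by omega
    rw [hmin]
    have hrep : ∀ (m : Nat) (hm : m < (List.replicate d.toNat (0:Int)).length),
        (List.replicate d.toNat (0:Int))[m] = pvSsum f d (m : Int) := by
      intro m hm
      simp only [List.getElem_replicate]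
      rw [pvSsum_zero f d m (by omega) (by omega) (by simp at hm; omega)]
    have hlen : ((List.replicate d.toNat (0:Int)).length : Int) = d := by simp; omega
    have e : PySem.List.pyRange d (f.length : Int) 1
        = PySem.List.pyRange ((List.replicate d.toNat (0:Int)).length : Int)
            (((List.replicate d.toNat (0:Int)).length : Int) + (f.length - d.toNat : Nat)) 1 := by
      have c2 : (((List.replicate d.toNat (0:Int)).length : Int) + ((f.length - d.toNat : Nat) : Int)) = (f.length : Int) := by
        simp; omega
      rw [c2, hlen]
    rw [e]
    obtain ⟨l1, l2⟩ := pvColB_loop f d hd (f.length - d.toNat) (List.replicate d.toNat 0)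
      (by simp only [List.length_replicate]; omega) hrep
    refine ⟨?_, l2⟩
    rw [l1]
    simp
    omega

lemma pvInv_init (f : List Int) (n q : Int) :
    pvInv f ((PySem.List.pyRange 1 (min n q + 1) 1).map (pvColB f)) := by
  intro i hi
  have hi' : i < (PySem.List.pyRange 1 (min n q + 1) 1).length := by simpa using hi
  simp only [List.getElem_map, PySem.List.getElem_pyRange_one]
  obtain ⟨l1, l2⟩ := pvColB_spec f (1 + (i : Int)) (by omega)
  refine ⟨l1, fun m hm => ?_⟩
  rw [l2 m hm]
  congr 1
  ring

lemma pvLoop (n q : Int) : ∀ (k : Nat) (f : List Int) (S : List (List Int)),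
    pvInv f S → S.length = (min n q).toNat → (f.length : Int) + k = n + 1 →
    ((PySem.List.pyRange (f.length : Int) (n + 1) 1).foldl
        (fun p n_i => pvStepB n_i p.1 p.2) (S, f)).2
      = (PySem.List.pyRange (f.length : Int) (n + 1) 1).foldl (pvBodyA q) f := by
  intro k
  induction k with
  | zero =>
    intro f S hInv hS hk
    rw [PySem.List.pyRange_one_eq_nil (by omega)]
    rfl
  | succ k ih =>
    intro f S hInv hS hk
    rw [PySem.List.pyRange_one_cons (by omega : (f.length : Int) < n + 1), List.foldl_cons,
      List.foldl_cons]
    have hsum := pvStep_sum n q f S hInv hS (by omega)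
    have hstep : pvStepB (f.length : Int) S f
        = ((PySem.List.enumerate S 0).map (fun ic => ic.2 ++ [pvSel (f.length : Int) f ic]),
           pvBodyA q f (f.length : Int)) := by
      rw [pvStepB_eq, hsum]
      rfl
    rw [hstep]
    have hblen : (pvBodyA q f (f.length : Int)).length = f.length + 1 := by
      unfold pvBodyA
      simp
    have hInv' : pvInv (pvBodyA q f (f.length : Int))
        ((PySem.List.enumerate S 0).map (fun ic => ic.2 ++ [pvSel (f.length : Int) f ic])) := by
      have := pvInv_step f S (PySem.Int.floordiv
        (((PySem.List.pyRange 1 (min (f.length : Int) q + 1) 1).flatMap (fun d =>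
          (PySem.List.pyRange 1 (PySem.Int.floordiv (f.length : Int) d + 1) 1).map (fun j =>
            d * PySem.List.pyGetD f ((f.length : Int) - j * d) 0
              * PySem.List.pyGetD f (d - 1) 0))).sum) (f.length : Int)) hInv
      exact this
    have hS' : ((PySem.List.enumerate S 0).map
        (fun ic => ic.2 ++ [pvSel (f.length : Int) f ic])).length = (min n q).toNat := by
      simpa [PySem.List.length_enumerate] using hS
    have e : ((f.length : Int) + 1) = ((pvBodyA q f (f.length : Int)).length : Int) := by
      rw [hblen]; push_cast; ring
    rw [e]
    exact ih (pvBodyA q f (f.length : Int)) _ hInv' hS' (by rw [hblen]; push_cast; push_cast at hk; omega)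


-- ===== VERDICT (by name: the statement is the Claim_ definition above) =====
theorem num_rooted_forests_py_spec : Claim_equal_num_rooted_forests_py := by
  intro n q c _hdom _hpre
  unfold Spec_num_rooted_forests_py num_rooted_forests_py num_rooted_forests_py_alt
  simp only [PySem.List.len_eq]
  by_cases h : (c.length : Int) ≤ n
  · rw [if_pos h]
    congr 1
    exact (pvLoop n q (n + 1 - c.length).toNat c _ (pvInv_init c n q)
      (by simp only [List.length_map, PySem.List.length_pyRange_one]; omega) (by omega)).symm
  · rw [if_neg h, PySem.List.pyRange_one_eq_nil (by omega)]
    rfl
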